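-- pv_equiv track=rewrite | github.com/bekingcn/youtube-hub | main.py | merge_time_text_lines
-- ===== SOURCE A (Python) =====
-- def merge_time_text_lines(time_text: str, merge_lines: int) -> str:
--     lines = time_text.split("\n")
--     total_len = len(lines)
--     new_lines = []
--     for i in range(0, total_len, merge_lines):
--         time_len = lines[i].index("]") + 1
--         time_text = lines[i][:time_len]
--         caption = lines[i][time_len:].strip()
--         for j in range(i + 1, min(total_len, i + merge_lines)):
--             time_len = lines[j].index("]") + 1
--             caption += " " + lines[j][time_len:].strip()
--         new_lines.append(f"{time_text} {caption}")
--     return new_lines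
-- ===== SOURCE B (Python) =====
-- def merge_time_text_lines(time_text: str, merge_lines: int) -> str:
--     if merge_lines < 1:
--         return []  # nothing to merge for a non-positive group size
--     out = []
--     group_prefix = ""
--     bodies = []
--     for line in time_text.split("\n"):
--         k = line.index("]") + 1
--         if not bodies:
--             group_prefix = line[:k]
--         bodies.append(line[k:].strip())
--         if len(bodies) == merge_lines:
--             out.append(f"{group_prefix} {' '.join(bodies)}")
--             bodies = []
--     if bodies:
--         out.append(f"{group_prefix} {' '.join(bodies)}")
--     return out
-- ===== Notes on version B (the rewrite author's own statement) =====
-- stated objective: alternative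
-- what changed: B replaces A's range(0,len,step) indexing with a nested per-group loop that re-reads lines[j] by a single pass over the lines carrying an accumulator (current group prefix + pending stripped bodies) flushed whenever the group is full, plus a final flush for the last partial group; a guard clause returns [] for a non-positive group size.
import Mathlib
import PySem

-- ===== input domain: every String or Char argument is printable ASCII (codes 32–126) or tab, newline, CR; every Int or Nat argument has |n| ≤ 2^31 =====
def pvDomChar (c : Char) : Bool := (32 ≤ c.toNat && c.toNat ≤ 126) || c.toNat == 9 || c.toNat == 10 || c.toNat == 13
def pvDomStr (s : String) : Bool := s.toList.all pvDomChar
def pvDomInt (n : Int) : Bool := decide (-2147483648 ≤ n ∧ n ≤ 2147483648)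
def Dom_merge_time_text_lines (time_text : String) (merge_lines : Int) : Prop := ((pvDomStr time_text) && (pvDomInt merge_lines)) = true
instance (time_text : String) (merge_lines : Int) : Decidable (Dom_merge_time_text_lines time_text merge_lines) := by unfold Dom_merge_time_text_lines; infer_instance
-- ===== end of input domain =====

-- B replaces A's range-stepped indexing (with an inner re-parsing loop per group) by ONE pass over the
-- lines with an accumulator (current prefix + pending bodies) flushed when the
-- group is full (an early guard returns [] for a non-positive group size); same return value on Pre_; strings handled on List Char via PySem.Chars.

-- ===== PORT A =====
def merge_time_text_lines (time_text : String) (merge_lines : Int) : List String :=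
  let lines := PySem.Chars.splitOn time_text.toList "\n".toList
  let total_len : Int := lines.length
  let new_lines := (PySem.List.pyRange 0 total_len merge_lines).foldl (fun new_lines i =>
    let li := PySem.List.pyGetD lines i []
    let time_len := PySem.Chars.find li "]".toList + 1
    let tt := PySem.Chars.slice li none (some time_len)
    let caption0 := PySem.Chars.strip (PySem.Chars.slice li (some time_len) none)
    let caption := (PySem.List.pyRange (i + 1) (min total_len (i + merge_lines)) 1).foldl
      (fun cap j =>
        let lj := PySem.List.pyGetD lines j []
        let tl := PySem.Chars.find lj "]".toList + 1
        cap ++ ' ' :: PySem.Chars.strip (PySem.Chars.slice lj (some tl) none)) caption0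
    new_lines ++ [tt ++ ' ' :: caption]) []
  new_lines.map String.ofList

-- ===== PORT B =====
def merge_time_text_lines_alt (time_text : String) (merge_lines : Int) : List String :=
  if merge_lines < 1 then []  -- nothing to merge for a non-positive group size
  else
  let step := fun (st : List (List Char) × List Char × List (List Char)) (line : List Char) =>
    let k := PySem.Chars.find line "]".toList + 1
    let pfx := if st.2.2.isEmpty then PySem.Chars.slice line none (some k) else st.2.1
    let bodies := st.2.2 ++ [PySem.Chars.strip (PySem.Chars.slice line (some k) none)]
    if (bodies.length : Int) = merge_lines then
      (st.1 ++ [pfx ++ ' ' :: PySem.Chars.join [' '] bodies], pfx, ([] : List (List Char)))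
    else (st.1, pfx, bodies)
  let res := (PySem.Chars.splitOn time_text.toList "\n".toList).foldl step ([], [], [])
  let out := if res.2.2.isEmpty then res.1
             else res.1 ++ [res.2.1 ++ ' ' :: PySem.Chars.join [' '] res.2.2]
  out.map String.ofList

-- ===== PRECONDITION & SPEC =====
-- Pre_ excludes exactly the inputs on which A raises ValueError: merge_lines = 0 (range step 0) and
-- positive merge_lines with some line lacking "]" (str.index).
def Pre_merge_time_text_lines (time_text : String) (merge_lines : Int) : Prop :=
  merge_lines < 0 ∨
  (1 ≤ merge_lines ∧
   ∀ l ∈ PySem.Chars.splitOn time_text.toList "\n".toList, PySem.Chars.isIn "]".toList l = true)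
instance (time_text : String) (merge_lines : Int) : Decidable (Pre_merge_time_text_lines time_text merge_lines) := by unfold Pre_merge_time_text_lines; infer_instance
def pvWitness_merge_time_text_lines : String × Int := ("[0:01] hi\n[0:02] there\n[0:03] all", 2)


def Spec_merge_time_text_lines (time_text : String) (merge_lines : Int) (out : List String) : Prop := out = merge_time_text_lines_alt time_text merge_lines
instance (time_text : String) (merge_lines : Int) (out : List String) : Decidable (Spec_merge_time_text_lines time_text merge_lines out) := by unfold Spec_merge_time_text_lines; infer_instance

-- ===== CLAIM (what is proved, stated in full; the proofs are below) =====
def Claim_equal_merge_time_text_lines : Prop := ∀ (time_text : String) (merge_lines : Int), Dom_merge_time_text_lines time_text merge_lines → Pre_merge_time_text_lines time_text merge_lines → Spec_merge_time_text_lines time_text merge_lines (merge_time_text_lines time_text merge_lines)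

-- ===== LEMMAS AND PROOFS =====

-- the common parse of one line: ("[…]" prefix, stripped body)
def pvParse (line : List Char) : List Char × List Char :=
  let k := PySem.Chars.find line "]".toList + 1
  (PySem.Chars.slice line none (some k), PySem.Chars.strip (PySem.Chars.slice line (some k) none))

def pvRender (pfx : List Char) (bodies : List (List Char)) : List Char :=
  pfx ++ ' ' :: PySem.Chars.join [' '] bodies

def pvChunkF (chunk : List (List Char × List Char)) : List Char :=
  pvRender (chunk.headD ([], [])).1 (chunk.map (·.2))

-- the common specification: groups of n+1 parsed lines, rendered
def pvChunks (n : ℕ) : List (List Char × List Char) → List (List Char)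
  | [] => []
  | p :: t => pvChunkF ((p :: t).take (n + 1)) :: pvChunks n ((p :: t).drop (n + 1))
termination_by ps => ps.length
decreasing_by simp

-- B's loop body, on parsed pairs
def pvStep (m : Int) (st : List (List Char) × List Char × List (List Char))
    (pr : List Char × List Char) : List (List Char) × List Char × List (List Char) :=
  let pfx := if st.2.2.isEmpty then pr.1 else st.2.1
  let bodies := st.2.2 ++ [pr.2]
  if (bodies.length : Int) = m then (st.1 ++ [pvRender pfx bodies], pfx, []) else (st.1, pfx, bodies)

-- groups still to be emitted given a pending partial group (pfx, bodies)
def pvCont (n : ℕ) (pfx : List Char) (bodies : List (List Char))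
    (xs : List (List Char × List Char)) : List (List Char) :=
  if bodies.isEmpty then pvChunks n xs
  else if xs.length < n + 1 - bodies.length then [pvRender pfx (bodies ++ xs.map (·.2))]
  else pvRender pfx (bodies ++ (xs.take (n + 1 - bodies.length)).map (·.2))
         :: pvChunks n (xs.drop (n + 1 - bodies.length))

-- range with step < 0 starting at 0 towards a nonnegative stop is empty
lemma pyRange_zero_nonpos (n s : Int) (hn : 0 ≤ n) (hs : s ≤ 0) :
    PySem.List.pyRange 0 n s = [] := by
  unfold PySem.List.pyRange
  rcases lt_or_eq_of_le hs with h | h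
  · simp [h.ne, not_lt.mpr hn, not_lt_of_gt h]
  · simp [h]

-- A's inner accumulation loop is a ' '-join over the mapped bodies
lemma foldl_sep_join (f : Int → List Char) (js : List Int) (c0 : List Char) :
    js.foldl (fun cap j => cap ++ ' ' :: f j) c0
      = PySem.Chars.join [' '] (c0 :: js.map f) := by
  induction js generalizing c0 with
  | nil => simp [PySem.Chars.join_singleton]
  | cons j t ih =>
      simp only [List.foldl_cons, List.map_cons, ih]
      cases t with
      | nil => simp [PySem.Chars.join_singleton, PySem.Chars.join_cons_cons]
      | cons q r =>
          simp only [List.map_cons, PySem.Chars.join_cons_cons]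
          simp

-- an index range mapped through pyGetD is a drop/take segment
lemma map_pyGetD_pyRange_seg {α : Type} (xs : List α) (d : α) (a b : Int)
    (ha : 0 ≤ a) (hb : b ≤ xs.length) :
    (PySem.List.pyRange a b 1).map (fun j => PySem.List.pyGetD xs j d)
      = (xs.drop a.toNat).take (b - a).toNat := by
  by_cases h : b ≤ a
  · rw [PySem.List.pyRange_one_eq_nil h]
    have : (b - a).toNat = 0 := by omega
    simp [this]
  · push_neg at h
    have hlen : (b - a).toNat = ((b - (a + 1)).toNat) + 1 := by omega
    rw [PySem.List.pyRange_one_cons h, List.map_cons,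
        map_pyGetD_pyRange_seg xs d (a + 1) b (by omega) hb, hlen]
    have hab : a.toNat < xs.length := by omega
    rw [List.drop_eq_getElem_cons hab, List.take_succ_cons,
        PySem.List.pyGetD_eq_getElem xs d ha (by omega)]
    have : (a + 1).toNat = a.toNat + 1 := by omega
    rw [this]
termination_by (b - a).toNat
decreasing_by omega

-- per-chunk agreement: A's group built at index i is the parsed slice
lemma chunk_eq {α β : Type} (parse : α → List Char × β) (xs : List α) (dα : α)
    (i m : Int) (h0 : 0 ≤ i) (hn : i < xs.length) (hm : 0 < m) :
    PySem.List.slice (xs.map parse) (some i) (some (i + m))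
      = parse (PySem.List.pyGetD xs i dα)
        :: (PySem.List.pyRange (i + 1) (min (xs.length : Int) (i + m)) 1).map
             (fun j => parse (PySem.List.pyGetD xs j dα)) := by
  have hmap : (PySem.List.pyRange (i + 1) (min (xs.length : Int) (i + m)) 1).map
      (fun j => parse (PySem.List.pyGetD xs j dα))
      = ((PySem.List.pyRange (i + 1) (min (xs.length : Int) (i + m)) 1).map
          (fun j => PySem.List.pyGetD xs j dα)).map parse := by
    simp [List.map_map]
  rw [PySem.List.slice_toNat _ h0 (by omega), ← List.map_drop, ← List.map_take, hmap,
      map_pyGetD_pyRange_seg xs dα (i + 1) _ (by omega) (by omega),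
      PySem.List.pyGetD_eq_getElem xs dα h0 hn, ← List.map_cons]
  congr 1
  have hi' : i.toNat < xs.length := by omega
  have hT : (i + m).toNat - i.toNat = ((i + m).toNat - i.toNat - 1) + 1 := by omega
  have hi1 : (i + 1).toNat = i.toNat + 1 := by omega
  rw [List.drop_eq_getElem_cons hi', hT, List.take_succ_cons, hi1]
  congr 1
  by_cases h : i + m ≤ (xs.length : Int)
  · have : (min (xs.length : Int) (i + m) - (i + 1)).toNat = (i + m).toNat - i.toNat - 1 := by
      omega
    rw [this]
  · push_neg at h
    have hlen : (xs.drop (i.toNat + 1)).length = xs.length - (i.toNat + 1) := by simp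
    rw [List.take_of_length_le (by omega), List.take_of_length_le (by omega)]

-- a positive-step range peels its first element
lemma pyRange_pos_cons (a b s : Int) (hs : 0 < s) (h : a < b) :
    PySem.List.pyRange a b s = a :: PySem.List.pyRange (a + s) b s := by
  rw [PySem.List.pyRange_of_pos _ _ hs, PySem.List.pyRange_of_pos _ _ hs]
  have hq : 0 ≤ (b - a - 1) / s := Int.ediv_nonneg (by omega) (by omega)
  have hcnt : ((b - a + s - 1) / s).toNat = ((b - a - 1) / s).toNat + 1 := by
    have : b - a + s - 1 = (b - a - 1) + 1 * s := by ring
    rw [this, Int.add_mul_ediv_right _ _ (by omega : s ≠ 0)]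
    omega
  by_cases h2 : a + s < b
  · have hq2 : ((b - (a + s) + s - 1) / s).toNat = ((b - a - 1) / s).toNat := by
      congr 2; ring
    rw [if_pos h, if_pos h2, hcnt, hq2, List.range_succ_eq_map, List.map_cons, List.map_map]
    congr 1
    · norm_num
    · apply List.map_congr_left; intro k _; simp [Function.comp]; ring
  · have hz : (b - a - 1) / s = 0 := Int.ediv_eq_zero_of_lt (by omega) (by omega)
    rw [if_pos h, if_neg h2, hcnt, hz, List.range_succ_eq_map]
    norm_num

-- a positive-step range shifts
lemma pyRange_shift (a b d s : Int) (hs : 0 < s) :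
    PySem.List.pyRange (a + d) (b + d) s = (PySem.List.pyRange a b s).map (· + d) := by
  rw [PySem.List.pyRange_of_pos _ _ hs, PySem.List.pyRange_of_pos _ _ hs]
  have h2 : b + d - (a + d) + s - 1 = b - a + s - 1 := by ring
  by_cases hab : a < b
  · rw [if_pos (by omega : a + d < b + d), if_pos hab, h2, List.map_map]
    apply List.map_congr_left; intro k _; simp [Function.comp]; ring
  · rw [if_neg (by omega : ¬ a + d < b + d), if_neg hab]
    simp

lemma pvCont_start (n : ℕ) (p : List Char × List Char) (t : List (List Char × List Char))
    (hn : 1 ≤ n) : pvCont n p.1 [p.2] t = pvChunks n (p :: t) := by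
  rw [pvChunks]
  simp only [pvCont, List.isEmpty_cons, List.length_cons, List.length_nil]
  by_cases h : t.length < n + 1 - 1
  · rw [if_pos h]
    have h1 : (p :: t).take (n + 1) = p :: t := by
      apply List.take_of_length_le; simp; omega
    have h2 : (p :: t).drop (n + 1) = [] := by
      apply List.drop_eq_nil_of_le; simp; omega
    simp [h1, h2, pvChunks, pvChunkF, pvRender]
  · rw [if_neg h]
    have h1 : n + 1 - 1 = n := by omega
    simp [h1, pvChunkF, pvRender]

lemma pvCont_step (n : ℕ) (pfx : List Char) (bodies : List (List Char))
    (p : List Char × List Char) (t : List (List Char × List Char))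
    (hb : bodies ≠ []) (hlen : bodies.length + 1 ≤ n) :
    pvCont n pfx bodies (p :: t) = pvCont n pfx (bodies ++ [p.2]) t := by
  simp only [pvCont]
  rw [if_neg (show ¬(bodies.isEmpty = true) by simp [hb]),
      if_neg (show ¬((bodies ++ [p.2]).isEmpty = true) by simp)]
  simp only [List.length_cons, List.length_append, List.length_nil]
  by_cases h : t.length < n - bodies.length
  · rw [if_pos (by omega), if_pos (by omega)]
    simp
  · rw [if_neg (by omega), if_neg (by omega)]
    have hk : n + 1 - bodies.length = (n - bodies.length) + 1 := by omega
    have hk2 : n + 1 - (bodies.length + 1) = n - bodies.length := by omega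
    rw [hk, hk2]
    simp

lemma pvCont_flush (n : ℕ) (pfx : List Char) (bodies : List (List Char))
    (p : List Char × List Char) (t : List (List Char × List Char))
    (hb : bodies ≠ []) (hlen : bodies.length = n) :
    pvCont n pfx bodies (p :: t) = pvRender pfx (bodies ++ [p.2]) :: pvChunks n t := by
  simp only [pvCont]
  rw [if_neg (by simp [hb]), if_neg (by simp; omega)]
  have hk : n + 1 - bodies.length = 1 := by omega
  simp [hk]

lemma pvStep_inv (n : ℕ) (xs : List (List Char × List Char)) :
    ∀ (out : List (List Char)) (pfx : List Char) (bodies : List (List Char)),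
    bodies.length ≤ n →
    (let res := xs.foldl (pvStep ((n : Int) + 1)) (out, pfx, bodies)
     if res.2.2.isEmpty then res.1 else res.1 ++ [pvRender res.2.1 res.2.2])
      = out ++ pvCont n pfx bodies xs := by
  induction xs with
  | nil =>
      intro out pfx bodies hlen
      cases bodies with
      | nil => simp [pvCont, pvChunks]
      | cons b bs =>
          simp only [List.foldl_nil, pvCont]
          rw [if_neg (show ¬((b :: bs).isEmpty = true) by simp),
              if_pos (show ([] : List (List Char × List Char)).length < n + 1 - (b :: bs).length by
                simp at hlen ⊢; omega)]
          simp
  | cons p t ih =>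
      intro out pfx bodies hlen
      rw [List.foldl_cons]
      by_cases hb : bodies = []
      · subst hb
        by_cases hn0 : n = 0
        · subst hn0
          have hstep : pvStep ((0 : ℕ) + 1 : Int)
              (out, pfx, ([] : List (List Char))) p
              = (out ++ [pvRender p.1 [p.2]], p.1, []) := by
            simp [pvStep]
          rw [hstep, ih _ _ _ (by simp)]
          simp only [pvCont, List.isEmpty_nil, if_pos]
          rw [pvChunks]
          simp [pvChunkF, pvRender, List.append_assoc]
        · have hstep : pvStep ((n : Int) + 1) (out, pfx, ([] : List (List Char))) p
              = (out, p.1, [p.2]) := by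
            simp only [pvStep, List.isEmpty_nil, if_pos, List.nil_append]
            rw [if_neg (by simp; omega)]
          rw [hstep, ih _ _ _ (by simp; omega)]
          rw [pvCont_start n p t (by omega)]
          simp [pvCont]
      · by_cases hfl : bodies.length = n
        · have hstep : pvStep ((n : Int) + 1) (out, pfx, bodies) p
              = (out ++ [pvRender pfx (bodies ++ [p.2])], pfx, []) := by
            simp only [pvStep]
            rw [if_neg (show ¬(bodies.isEmpty = true) by simp [hb]),
                if_pos (by simp; omega)]
          rw [hstep, ih _ _ _ (by simp)]
          rw [pvCont_flush n pfx bodies p t hb hfl]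
          simp [pvCont]
        · have hstep : pvStep ((n : Int) + 1) (out, pfx, bodies) p
              = (out, pfx, bodies ++ [p.2]) := by
            simp only [pvStep]
            rw [if_neg (show ¬(bodies.isEmpty = true) by simp [hb]),
                if_neg (by simp; omega)]
          rw [hstep, ih _ _ _ (by simp; omega)]
          rw [pvCont_step n pfx bodies p t hb (by omega)]
lemma pyRange_chunks (n : ℕ) (ps : List (List Char × List Char)) :
    (PySem.List.pyRange 0 (ps.length : Int) ((n : Int) + 1)).map
      (fun i => pvChunkF (PySem.List.slice ps (some i) (some (i + ((n : Int) + 1)))))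
      = pvChunks n ps := by
  have hm : (0 : Int) < (n : Int) + 1 := by positivity
  cases ps with
  | nil =>
      rw [PySem.List.pyRange_of_pos _ _ hm]
      simp [pvChunks]
  | cons p t =>
      have hL : (0 : Int) < (((p :: t).length : ℕ) : Int) := by
        simp
      rw [pyRange_pos_cons 0 _ _ hm hL, List.map_cons, pvChunks]
      congr 1
      · -- head group
        rw [show (0 : Int) + ((n : Int) + 1) = (((n + 1 : ℕ) : ℕ) : Int) by push_cast; ring]
        rw [PySem.List.slice_zero_start, PySem.List.slice_to_natCast]
      · -- tail groups
        rw [show (0 : Int) + ((n : Int) + 1) = (n : Int) + 1 by ring]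
        by_cases hcut : (((p :: t).length : ℕ) : Int) ≤ (n : Int) + 1
        · have hdrop : (p :: t).drop (n + 1) = [] :=
            List.drop_eq_nil_of_le (by simp at hcut ⊢; omega)
          rw [PySem.List.pyRange_of_pos _ _ hm, if_neg (by omega)]
          simp [hdrop, pvChunks]
        · push_neg at hcut
          have hlen : ((((p :: t).drop (n + 1)).length : ℕ) : Int)
              = (((p :: t).length : ℕ) : Int) - ((n : Int) + 1) := by
            simp at hcut ⊢; omega
          have hshift := pyRange_shift 0 ((((p :: t).length : ℕ) : Int) - ((n : Int) + 1))
            ((n : Int) + 1) ((n : Int) + 1) hm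
          rw [show (0 : Int) + ((n : Int) + 1) = (n : Int) + 1 by ring,
              show (((p :: t).length : ℕ) : Int) - ((n : Int) + 1) + ((n : Int) + 1)
                = (((p :: t).length : ℕ) : Int) by ring] at hshift
          rw [hshift, List.map_map, ← hlen, ← pyRange_chunks n ((p :: t).drop (n + 1))]
          apply List.map_congr_left
          intro i hi
          rw [PySem.List.mem_pyRange_iff_of_pos hm] at hi
          obtain ⟨hi0, -, -⟩ := hi
          simp only [Function.comp]
          congr 1
          rw [PySem.List.slice_toNat _ (by omega) (by omega),
              PySem.List.slice_toNat _ hi0 (by omega)]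
          rw [List.drop_drop]
          congr 1
          · omega
          · congr 1; omega
termination_by ps.length
decreasing_by simp

-- A equals the chunk recursion
lemma A_eq_chunks (n : ℕ) (t : String) :
    merge_time_text_lines t ((n : Int) + 1)
      = (pvChunks n ((PySem.Chars.splitOn t.toList "\n".toList).map pvParse)).map String.ofList := by
  have hm : (0 : Int) < (n : Int) + 1 := by positivity
  unfold merge_time_text_lines
  simp only []
  set lines := PySem.Chars.splitOn t.toList "\n".toList with hl
  rw [PySem.List.foldl_append_singleton_eq_map, List.nil_append,
      ← pyRange_chunks n (lines.map pvParse)]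
  simp only [List.length_map]
  congr 1
  apply List.map_congr_left
  intro i hi
  rw [PySem.List.mem_pyRange_iff_of_pos hm] at hi
  obtain ⟨hi0, hiL, -⟩ := hi
  rw [foldl_sep_join,
      chunk_eq pvParse lines [] i ((n : Int) + 1) hi0 hiL hm]
  simp only [pvChunkF, List.headD_cons, List.map_cons, List.map_map]
  rfl

-- B equals the chunk recursion
lemma B_eq_chunks (n : ℕ) (t : String) :
    merge_time_text_lines_alt t ((n : Int) + 1)
      = (pvChunks n ((PySem.Chars.splitOn t.toList "\n".toList).map pvParse)).map String.ofList := by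
  unfold merge_time_text_lines_alt
  rw [if_neg (by omega : ¬((n : Int) + 1 < 1))]
  show (let res := (PySem.Chars.splitOn t.toList "\n".toList).foldl
          (fun st line => pvStep ((n : Int) + 1) st (pvParse line)) ([], [], [])
        let out := if res.2.2.isEmpty then res.1
                   else res.1 ++ [pvRender res.2.1 res.2.2]
        out.map String.ofList) = _
  rw [← List.foldl_map]
  have h := pvStep_inv n ((PySem.Chars.splitOn t.toList "\n".toList).map pvParse)
    [] [] [] (by simp)
  simp only [] at h
  simp only []
  rw [h]
  simp [pvCont]

-- ===== VERDICT (by name: the statement is the Claim_ definition above) =====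
theorem merge_time_text_lines_spec : Claim_equal_merge_time_text_lines := by
  intro time_text merge_lines _hdom hpre
  unfold Spec_merge_time_text_lines
  rcases hpre with hneg | ⟨hm, -⟩
  · unfold merge_time_text_lines merge_time_text_lines_alt
    rw [if_pos (by omega : merge_lines < 1)]
    simp only []
    rw [pyRange_zero_nonpos _ _ (by positivity) (by omega)]
    simp
  · obtain ⟨n, rfl⟩ : ∃ n : ℕ, merge_lines = (n : Int) + 1 :=
      ⟨(merge_lines - 1).toNat, by omega⟩
    rw [A_eq_chunks, B_eq_chunks]
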